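-- pv_equiv track=rewrite | github.com/Gerrit8008/Scanner_CGT | split_enhanced_admin_dashboard.py | categorize_functions
-- ===== SOURCE A (Python) =====
-- def categorize_functions(functions):
--     """Categorize functions into modules based on their names and functionality."""
--     categories = {
--         'core': [],  # Main dashboard functions
--         'clients': [],  # Client-related functions
--         'scanners': [],  # Scanner-related functions
--         'leads': [],  # Lead-related functions
--         'stats': [],  # Statistical functions
--         'system': [],  # System health functions
--         'reports': [],  # Reporting functions
--         'utils': [],  # Utility functions
--     }
--
--     for func_name, func_block in functions:
--         if 'dashboard' in func_name or 'get_enhanced_' in func_name: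
--             categories['core'].append((func_name, func_block))
--         elif 'client' in func_name:
--             categories['clients'].append((func_name, func_block))
--         elif 'scanner' in func_name or 'scan_' in func_name:
--             categories['scanners'].append((func_name, func_block))
--         elif 'lead' in func_name or 'conversion' in func_name:
--             categories['leads'].append((func_name, func_block))
--         elif 'statistic' in func_name or 'stats' in func_name or 'count' in func_name:
--             categories['stats'].append((func_name, func_block))
--         elif 'system' in func_name or 'health' in func_name or 'usage' in func_name:
--             categories['system'].append((func_name, func_block))
--         elif 'report' in func_name or 'generate' in func_name or 'format' in func_name:
--             categories['reports'].append((func_name, func_block))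
--         else:
--             categories['utils'].append((func_name, func_block))
--
--     return categories
-- ===== SOURCE B (Python) =====
-- # Staged partition: one pass per category over the shrinking remainder list,
-- # instead of A's single pass dispatching each function through an elif chain.
-- def categorize_functions(functions):
--     """Categorize functions into modules based on their names and functionality."""
--     def split(pairs, test):
--         return ([p for p in pairs if test(p[0])],
--                 [p for p in pairs if not test(p[0])])
--
--     categories = {}
--     rest = list(functions)
--     categories['core'], rest = split(rest, lambda n: 'dashboard' in n or 'get_enhanced_' in n)
--     categories['clients'], rest = split(rest, lambda n: 'client' in n)
--     categories['scanners'], rest = split(rest, lambda n: 'scanner' in n or 'scan_' in n)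
--     categories['leads'], rest = split(rest, lambda n: 'lead' in n or 'conversion' in n)
--     categories['stats'], rest = split(rest, lambda n: 'statistic' in n or 'stats' in n or 'count' in n)
--     categories['system'], rest = split(rest, lambda n: 'system' in n or 'health' in n or 'usage' in n)
--     categories['reports'], rest = split(rest, lambda n: 'report' in n or 'generate' in n or 'format' in n)
--     categories['utils'] = rest
--     return categories
-- ===== Notes on version B (the rewrite author's own statement) =====
-- stated objective: alternative
-- what changed: Replaces A's single pass that routes each function through an eight-branch elif chain with staged passes: for each category in priority order, split the remaining list into matches and non-matches, assign the matches, and hand the remainder on; 'utils' is the final leftover.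
import Mathlib
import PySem

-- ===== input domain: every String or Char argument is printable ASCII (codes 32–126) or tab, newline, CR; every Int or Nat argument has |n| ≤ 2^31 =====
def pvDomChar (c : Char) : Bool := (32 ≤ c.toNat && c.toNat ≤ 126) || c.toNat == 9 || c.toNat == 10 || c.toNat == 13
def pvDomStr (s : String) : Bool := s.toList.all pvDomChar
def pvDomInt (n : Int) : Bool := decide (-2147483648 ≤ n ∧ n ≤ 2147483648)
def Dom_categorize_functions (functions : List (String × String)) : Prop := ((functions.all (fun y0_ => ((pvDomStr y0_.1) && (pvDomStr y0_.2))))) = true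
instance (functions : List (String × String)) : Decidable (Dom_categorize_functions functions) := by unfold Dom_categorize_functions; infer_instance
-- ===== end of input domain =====

-- B replaces A's one-pass elif dispatch by staged partition passes, one per category
-- over the shrinking remainder (objective: alternative; same return value).

-- ===== PORT A =====
def categorize_functions (functions : List (String × String)) : List (String × List (String × String)) :=
  let categories : PySem.Dict String (List (String × String)) :=
    ((((((((PySem.Dict.empty.insert "core" []).insert "clients" []).insert "scanners" []).insert
      "leads" []).insert "stats" []).insert "system" []).insert "reports" []).insert "utils" [])
  let final := functions.foldl (fun d p =>
    let n := p.1
    if PySem.Str.isIn "dashboard" n || PySem.Str.isIn "get_enhanced_" n then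
      d.modify "core" [] (· ++ [p])
    else if PySem.Str.isIn "client" n then
      d.modify "clients" [] (· ++ [p])
    else if PySem.Str.isIn "scanner" n || PySem.Str.isIn "scan_" n then
      d.modify "scanners" [] (· ++ [p])
    else if PySem.Str.isIn "lead" n || PySem.Str.isIn "conversion" n then
      d.modify "leads" [] (· ++ [p])
    else if PySem.Str.isIn "statistic" n || PySem.Str.isIn "stats" n || PySem.Str.isIn "count" n then
      d.modify "stats" [] (· ++ [p])
    else if PySem.Str.isIn "system" n || PySem.Str.isIn "health" n || PySem.Str.isIn "usage" n then
      d.modify "system" [] (· ++ [p])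
    else if PySem.Str.isIn "report" n || PySem.Str.isIn "generate" n || PySem.Str.isIn "format" n then
      d.modify "reports" [] (· ++ [p])
    else
      d.modify "utils" [] (· ++ [p])) categories
  final.items

-- ===== PORT B =====
-- Source B's local helper split(pairs, test): (matches, non-matches) by two comprehensions
def pvSplit (pairs : List (String × String)) (test : String → Bool) :
    List (String × String) × List (String × String) :=
  (pairs.filter (fun p => test p.1), pairs.filter (fun p => !(test p.1)))

def categorize_functions_alt (functions : List (String × String)) : List (String × List (String × String)) :=
  let s1 := pvSplit functions (fun n => PySem.Str.isIn "dashboard" n || PySem.Str.isIn "get_enhanced_" n)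
  let s2 := pvSplit s1.2 (fun n => PySem.Str.isIn "client" n)
  let s3 := pvSplit s2.2 (fun n => PySem.Str.isIn "scanner" n || PySem.Str.isIn "scan_" n)
  let s4 := pvSplit s3.2 (fun n => PySem.Str.isIn "lead" n || PySem.Str.isIn "conversion" n)
  let s5 := pvSplit s4.2 (fun n => PySem.Str.isIn "statistic" n || PySem.Str.isIn "stats" n || PySem.Str.isIn "count" n)
  let s6 := pvSplit s5.2 (fun n => PySem.Str.isIn "system" n || PySem.Str.isIn "health" n || PySem.Str.isIn "usage" n)
  let s7 := pvSplit s6.2 (fun n => PySem.Str.isIn "report" n || PySem.Str.isIn "generate" n || PySem.Str.isIn "format" n)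
  (((((((((PySem.Dict.empty.insert "core" s1.1).insert "clients" s2.1).insert "scanners" s3.1).insert
      "leads" s4.1).insert "stats" s5.1).insert "system" s6.1).insert "reports" s7.1).insert "utils" s7.2)).items

-- ===== PRECONDITION & SPEC =====
def Spec_categorize_functions (functions : List (String × String)) (out : List (String × List (String × String))) : Prop := out = categorize_functions_alt functions
instance (functions : List (String × String)) (out : List (String × List (String × String))) : Decidable (Spec_categorize_functions functions out) := by unfold Spec_categorize_functions; infer_instance

-- ===== CLAIM (what is proved, stated in full; the proofs are below) =====
def Claim_equal_categorize_functions : Prop := ∀ (functions : List (String × String)), Dom_categorize_functions functions → Spec_categorize_functions functions (categorize_functions functions)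

-- ===== LEMMAS AND PROOFS =====
-- proof-only helpers: the seven branch tests, the staged remainders, the dict literal, A's loop step
def pvQ1 (p : String × String) : Bool := PySem.Str.isIn "dashboard" p.1 || PySem.Str.isIn "get_enhanced_" p.1
def pvQ2 (p : String × String) : Bool := PySem.Str.isIn "client" p.1
def pvQ3 (p : String × String) : Bool := PySem.Str.isIn "scanner" p.1 || PySem.Str.isIn "scan_" p.1
def pvQ4 (p : String × String) : Bool := PySem.Str.isIn "lead" p.1 || PySem.Str.isIn "conversion" p.1
def pvQ5 (p : String × String) : Bool := PySem.Str.isIn "statistic" p.1 || PySem.Str.isIn "stats" p.1 || PySem.Str.isIn "count" p.1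
def pvQ6 (p : String × String) : Bool := PySem.Str.isIn "system" p.1 || PySem.Str.isIn "health" p.1 || PySem.Str.isIn "usage" p.1
def pvQ7 (p : String × String) : Bool := PySem.Str.isIn "report" p.1 || PySem.Str.isIn "generate" p.1 || PySem.Str.isIn "format" p.1

def pvR1 (fs : List (String × String)) : List (String × String) := fs.filter (fun p => !pvQ1 p)
def pvR2 (fs : List (String × String)) : List (String × String) := (pvR1 fs).filter (fun p => !pvQ2 p)
def pvR3 (fs : List (String × String)) : List (String × String) := (pvR2 fs).filter (fun p => !pvQ3 p)
def pvR4 (fs : List (String × String)) : List (String × String) := (pvR3 fs).filter (fun p => !pvQ4 p)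
def pvR5 (fs : List (String × String)) : List (String × String) := (pvR4 fs).filter (fun p => !pvQ5 p)
def pvR6 (fs : List (String × String)) : List (String × String) := (pvR5 fs).filter (fun p => !pvQ6 p)
def pvR7 (fs : List (String × String)) : List (String × String) := (pvR6 fs).filter (fun p => !pvQ7 p)

def pvMkD (l1 l2 l3 l4 l5 l6 l7 l8 : List (String × String)) : PySem.Dict String (List (String × String)) :=
  PySem.Dict.mk [("core", l1), ("clients", l2), ("scanners", l3), ("leads", l4),
                 ("stats", l5), ("system", l6), ("reports", l7), ("utils", l8)]

def pvStepA (d : PySem.Dict String (List (String × String))) (p : String × String) :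
    PySem.Dict String (List (String × String)) :=
  if pvQ1 p then d.modify "core" [] (· ++ [p])
  else if pvQ2 p then d.modify "clients" [] (· ++ [p])
  else if pvQ3 p then d.modify "scanners" [] (· ++ [p])
  else if pvQ4 p then d.modify "leads" [] (· ++ [p])
  else if pvQ5 p then d.modify "stats" [] (· ++ [p])
  else if pvQ6 p then d.modify "system" [] (· ++ [p])
  else if pvQ7 p then d.modify "reports" [] (· ++ [p])
  else d.modify "utils" [] (· ++ [p])

lemma pv_step1 (l1 l2 l3 l4 l5 l6 l7 l8 : List (String × String)) (p : String × String)
    (h1 : pvQ1 p = true) :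
    pvStepA (pvMkD l1 l2 l3 l4 l5 l6 l7 l8) p = pvMkD (l1 ++ [p]) l2 l3 l4 l5 l6 l7 l8 := by
  unfold pvStepA; rw [if_pos h1]; rfl

lemma pv_step2 (l1 l2 l3 l4 l5 l6 l7 l8 : List (String × String)) (p : String × String)
    (h1 : pvQ1 p = false) (h2 : pvQ2 p = true) :
    pvStepA (pvMkD l1 l2 l3 l4 l5 l6 l7 l8) p = pvMkD l1 (l2 ++ [p]) l3 l4 l5 l6 l7 l8 := by
  unfold pvStepA; rw [if_neg (by simp [h1]), if_pos h2]; rfl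

lemma pv_step3 (l1 l2 l3 l4 l5 l6 l7 l8 : List (String × String)) (p : String × String)
    (h1 : pvQ1 p = false) (h2 : pvQ2 p = false) (h3 : pvQ3 p = true) :
    pvStepA (pvMkD l1 l2 l3 l4 l5 l6 l7 l8) p = pvMkD l1 l2 (l3 ++ [p]) l4 l5 l6 l7 l8 := by
  unfold pvStepA; rw [if_neg (by simp [h1]), if_neg (by simp [h2]), if_pos h3]; rfl

lemma pv_step4 (l1 l2 l3 l4 l5 l6 l7 l8 : List (String × String)) (p : String × String)
    (h1 : pvQ1 p = false) (h2 : pvQ2 p = false) (h3 : pvQ3 p = false) (h4 : pvQ4 p = true) :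
    pvStepA (pvMkD l1 l2 l3 l4 l5 l6 l7 l8) p = pvMkD l1 l2 l3 (l4 ++ [p]) l5 l6 l7 l8 := by
  unfold pvStepA; rw [if_neg (by simp [h1]), if_neg (by simp [h2]), if_neg (by simp [h3]), if_pos h4]; rfl

lemma pv_step5 (l1 l2 l3 l4 l5 l6 l7 l8 : List (String × String)) (p : String × String)
    (h1 : pvQ1 p = false) (h2 : pvQ2 p = false) (h3 : pvQ3 p = false) (h4 : pvQ4 p = false)
    (h5 : pvQ5 p = true) :
    pvStepA (pvMkD l1 l2 l3 l4 l5 l6 l7 l8) p = pvMkD l1 l2 l3 l4 (l5 ++ [p]) l6 l7 l8 := by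
  unfold pvStepA
  rw [if_neg (by simp [h1]), if_neg (by simp [h2]), if_neg (by simp [h3]), if_neg (by simp [h4]),
    if_pos h5]; rfl

lemma pv_step6 (l1 l2 l3 l4 l5 l6 l7 l8 : List (String × String)) (p : String × String)
    (h1 : pvQ1 p = false) (h2 : pvQ2 p = false) (h3 : pvQ3 p = false) (h4 : pvQ4 p = false)
    (h5 : pvQ5 p = false) (h6 : pvQ6 p = true) :
    pvStepA (pvMkD l1 l2 l3 l4 l5 l6 l7 l8) p = pvMkD l1 l2 l3 l4 l5 (l6 ++ [p]) l7 l8 := by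
  unfold pvStepA
  rw [if_neg (by simp [h1]), if_neg (by simp [h2]), if_neg (by simp [h3]), if_neg (by simp [h4]),
    if_neg (by simp [h5]), if_pos h6]; rfl

lemma pv_step7 (l1 l2 l3 l4 l5 l6 l7 l8 : List (String × String)) (p : String × String)
    (h1 : pvQ1 p = false) (h2 : pvQ2 p = false) (h3 : pvQ3 p = false) (h4 : pvQ4 p = false)
    (h5 : pvQ5 p = false) (h6 : pvQ6 p = false) (h7 : pvQ7 p = true) :
    pvStepA (pvMkD l1 l2 l3 l4 l5 l6 l7 l8) p = pvMkD l1 l2 l3 l4 l5 l6 (l7 ++ [p]) l8 := by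
  unfold pvStepA
  rw [if_neg (by simp [h1]), if_neg (by simp [h2]), if_neg (by simp [h3]), if_neg (by simp [h4]),
    if_neg (by simp [h5]), if_neg (by simp [h6]), if_pos h7]; rfl

lemma pv_step8 (l1 l2 l3 l4 l5 l6 l7 l8 : List (String × String)) (p : String × String)
    (h1 : pvQ1 p = false) (h2 : pvQ2 p = false) (h3 : pvQ3 p = false) (h4 : pvQ4 p = false)
    (h5 : pvQ5 p = false) (h6 : pvQ6 p = false) (h7 : pvQ7 p = false) :
    pvStepA (pvMkD l1 l2 l3 l4 l5 l6 l7 l8) p = pvMkD l1 l2 l3 l4 l5 l6 l7 (l8 ++ [p]) := by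
  unfold pvStepA
  rw [if_neg (by simp [h1]), if_neg (by simp [h2]), if_neg (by simp [h3]), if_neg (by simp [h4]),
    if_neg (by simp [h5]), if_neg (by simp [h6]), if_neg (by simp [h7])]; rfl

-- loop invariant for A's fold: each category list is the stage-i filter of the stage-(i-1) remainder
lemma pv_fold (fs : List (String × String)) : ∀ l1 l2 l3 l4 l5 l6 l7 l8 : List (String × String),
    List.foldl pvStepA (pvMkD l1 l2 l3 l4 l5 l6 l7 l8) fs
      = pvMkD (l1 ++ fs.filter pvQ1) (l2 ++ (pvR1 fs).filter pvQ2) (l3 ++ (pvR2 fs).filter pvQ3)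
          (l4 ++ (pvR3 fs).filter pvQ4) (l5 ++ (pvR4 fs).filter pvQ5) (l6 ++ (pvR5 fs).filter pvQ6)
          (l7 ++ (pvR6 fs).filter pvQ7) (l8 ++ pvR7 fs) := by
  induction fs with
  | nil => intro l1 l2 l3 l4 l5 l6 l7 l8; simp [pvR1, pvR2, pvR3, pvR4, pvR5, pvR6, pvR7]
  | cons p fs ih =>
    intro l1 l2 l3 l4 l5 l6 l7 l8
    rw [List.foldl_cons]
    by_cases h1 : pvQ1 p = true
    · rw [pv_step1 l1 l2 l3 l4 l5 l6 l7 l8 p h1, ih]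
      simp [pvMkD, pvR1, pvR2, pvR3, pvR4, pvR5, pvR6, pvR7, h1]
    rw [Bool.not_eq_true] at h1
    by_cases h2 : pvQ2 p = true
    · rw [pv_step2 l1 l2 l3 l4 l5 l6 l7 l8 p h1 h2, ih]
      simp [pvMkD, pvR1, pvR2, pvR3, pvR4, pvR5, pvR6, pvR7, h1, h2]
    rw [Bool.not_eq_true] at h2
    by_cases h3 : pvQ3 p = true
    · rw [pv_step3 l1 l2 l3 l4 l5 l6 l7 l8 p h1 h2 h3, ih]
      simp [pvMkD, pvR1, pvR2, pvR3, pvR4, pvR5, pvR6, pvR7, h1, h2, h3]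
    rw [Bool.not_eq_true] at h3
    by_cases h4 : pvQ4 p = true
    · rw [pv_step4 l1 l2 l3 l4 l5 l6 l7 l8 p h1 h2 h3 h4, ih]
      simp [pvMkD, pvR1, pvR2, pvR3, pvR4, pvR5, pvR6, pvR7, h1, h2, h3, h4]
    rw [Bool.not_eq_true] at h4
    by_cases h5 : pvQ5 p = true
    · rw [pv_step5 l1 l2 l3 l4 l5 l6 l7 l8 p h1 h2 h3 h4 h5, ih]
      simp [pvMkD, pvR1, pvR2, pvR3, pvR4, pvR5, pvR6, pvR7, h1, h2, h3, h4, h5]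
    rw [Bool.not_eq_true] at h5
    by_cases h6 : pvQ6 p = true
    · rw [pv_step6 l1 l2 l3 l4 l5 l6 l7 l8 p h1 h2 h3 h4 h5 h6, ih]
      simp [pvMkD, pvR1, pvR2, pvR3, pvR4, pvR5, pvR6, pvR7, h1, h2, h3, h4, h5, h6]
    rw [Bool.not_eq_true] at h6
    by_cases h7 : pvQ7 p = true
    · rw [pv_step7 l1 l2 l3 l4 l5 l6 l7 l8 p h1 h2 h3 h4 h5 h6 h7, ih]
      simp [pvMkD, pvR1, pvR2, pvR3, pvR4, pvR5, pvR6, pvR7, h1, h2, h3, h4, h5,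
        h6, h7]
    rw [Bool.not_eq_true] at h7
    rw [pv_step8 l1 l2 l3 l4 l5 l6 l7 l8 p h1 h2 h3 h4 h5 h6 h7, ih]
    simp [pvMkD, pvR1, pvR2, pvR3, pvR4, pvR5, pvR6, pvR7, h1, h2, h3, h4, h5,
      h6, h7]

-- A's result, characterised by the staged filters
lemma pvA_char (fs : List (String × String)) :
    categorize_functions fs
      = (pvMkD (fs.filter pvQ1) ((pvR1 fs).filter pvQ2) ((pvR2 fs).filter pvQ3)
          ((pvR3 fs).filter pvQ4) ((pvR4 fs).filter pvQ5) ((pvR5 fs).filter pvQ6)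
          ((pvR6 fs).filter pvQ7) (pvR7 fs)).items := by
  show (List.foldl pvStepA (pvMkD [] [] [] [] [] [] [] []) fs).items = _
  rw [pv_fold fs [] [] [] [] [] [] [] []]
  simp

-- B's result is those same staged filters, definitionally
lemma pvB_char (fs : List (String × String)) :
    categorize_functions_alt fs
      = (pvMkD (fs.filter pvQ1) ((pvR1 fs).filter pvQ2) ((pvR2 fs).filter pvQ3)
          ((pvR3 fs).filter pvQ4) ((pvR4 fs).filter pvQ5) ((pvR5 fs).filter pvQ6)
          ((pvR6 fs).filter pvQ7) (pvR7 fs)).items := by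
  rfl

-- ===== VERDICT (by name: the statement is the Claim_ definition above) =====
theorem categorize_functions_spec : Claim_equal_categorize_functions := by
  intro fs _
  unfold Spec_categorize_functions
  rw [pvA_char, pvB_char]
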